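-- pv_equiv track=rewrite | github.com/yongming-qin/rag-for-versioned-code | Scripts/rust_api_analyzer.py | _find_doc_start
-- ===== SOURCE A (Python) =====
-- def _find_doc_start(content: str, attr_start: int, max_lookback: int = 50) -> int:
--     """查找文档注释的起始位置"""
--     lines = content[:attr_start].split('\n')
--     doc_start = attr_start
--
--     for i in range(len(lines) - 1, max(-1, len(lines) - max_lookback - 1), -1):
--         line = lines[i].strip()
--         if not line or (not line.startswith('///') and not line.startswith('//!') and not line.startswith('#[')):
--             doc_start = sum(len(l) + 1 for l in lines[:i+1])
--             break
--
--     return doc_start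
-- ===== SOURCE B (Python) =====
-- def _find_doc_start(content: str, attr_start: int, max_lookback: int = 50) -> int:
--     """查找文档注释的起始位置"""
--     text = content[:attr_start]
--     lines = text.split('\n')
--     lo = max(0, len(lines) - max_lookback)
--     offset = sum(len(l) + 1 for l in lines[:lo])
--     result = attr_start
--     for line in lines[lo:]:
--         offset += len(line) + 1
--         s = line.strip()
--         if not (s and (s.startswith('///') or s.startswith('//!') or s.startswith('#['))):
--             result = offset
--     return result
-- ===== Notes on version B (the rewrite author's own statement) =====
-- stated objective: alternative
-- what changed: A scans the trailing window of lines backwards with a break and recomputes a prefix sum at the break; B makes one forward pass over the same window with a running offset, recording the offset after every non-doc line so the last recorded one (the highest-index non-doc line, exactly A's break point) wins, with no break, no index arithmetic and no inner sum pass.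
import Mathlib
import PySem

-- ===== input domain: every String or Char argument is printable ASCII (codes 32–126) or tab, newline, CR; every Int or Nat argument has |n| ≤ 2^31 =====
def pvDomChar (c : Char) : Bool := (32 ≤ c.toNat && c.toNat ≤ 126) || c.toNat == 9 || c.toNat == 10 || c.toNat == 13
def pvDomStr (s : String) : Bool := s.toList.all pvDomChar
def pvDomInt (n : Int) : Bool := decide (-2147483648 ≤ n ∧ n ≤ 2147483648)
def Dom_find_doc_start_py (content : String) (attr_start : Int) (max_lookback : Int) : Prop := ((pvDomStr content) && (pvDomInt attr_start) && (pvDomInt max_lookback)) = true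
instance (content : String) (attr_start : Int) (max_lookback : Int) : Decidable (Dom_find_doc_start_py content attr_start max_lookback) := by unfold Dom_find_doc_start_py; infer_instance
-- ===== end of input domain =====

-- B replaces A's backward scan (break at the first non-doc line, then an inner prefix-sum
-- pass) by ONE forward pass over the same trailing window with a running offset, recording
-- the offset after each non-doc line so the last one recorded wins (objective: alternative).

-- ===== PORT A =====
-- A: lines = content[:attr_start].split('\n'); scan i = len-1 .. max(-1, len-max_lookback-1)+1
-- descending; on the first non-doc line return sum(len(l)+1 for l in lines[:i+1]).
def pvSumPrefA (lines : List String) (i : Int) : Int :=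
  ((PySem.List.slice lines none (some (i + 1))).map (fun l => PySem.Str.len l + 1)).sum

def pvLoopA (lines : List String) (doc_start : Int) : List Int → Int
  | [] => doc_start
  | i :: rest =>
    let line := PySem.Str.strip ((PySem.List.pyGet? lines i).getD "")
    if line == "" || (!(PySem.Str.startswith line "///") && !(PySem.Str.startswith line "//!") && !(PySem.Str.startswith line "#[")) then
      pvSumPrefA lines i
    else pvLoopA lines doc_start rest

def find_doc_start_py (content : String) (attr_start : Int) (max_lookback : Int) : Int :=
  let lines := (PySem.Str.split? (PySem.Str.slice content none (some attr_start)) "\n").getD []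
  pvLoopA lines attr_start
    (PySem.List.pyRange ((lines.length : Int) - 1) (max (-1) ((lines.length : Int) - max_lookback - 1)) (-1))

-- ===== PORT B =====
-- B: lo = max(0, len(lines) - max_lookback); offset = sum over lines[:lo]; then ONE forward
-- pass over lines[lo:], offset growing per line, result := offset after each non-doc line.
def pvIsDocB (line : String) : Bool :=
  let s := PySem.Str.strip line
  !(s == "") && (PySem.Str.startswith s "///" || PySem.Str.startswith s "//!" || PySem.Str.startswith s "#[")

def pvLoopB (pos result : Int) : List String → Int
  | [] => result
  | line :: rest =>
    let pos' := pos + (PySem.Str.len line + 1)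
    if pvIsDocB line then pvLoopB pos' result rest
    else pvLoopB pos' pos' rest

def find_doc_start_py_alt (content : String) (attr_start : Int) (max_lookback : Int) : Int :=
  let text := PySem.Str.slice content none (some attr_start)
  let lines := (PySem.Str.split? text "\n").getD []
  let lo := max 0 ((lines.length : Int) - max_lookback)
  let offset := ((PySem.List.slice lines none (some lo)).map (fun l => PySem.Str.len l + 1)).sum
  pvLoopB offset attr_start (PySem.List.slice lines (some lo) none)

-- ===== PRECONDITION & SPEC =====
def Spec_find_doc_start_py (content : String) (attr_start : Int) (max_lookback : Int) (out : Int) : Prop := out = find_doc_start_py_alt content attr_start max_lookback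
instance (content : String) (attr_start : Int) (max_lookback : Int) (out : Int) : Decidable (Spec_find_doc_start_py content attr_start max_lookback out) := by unfold Spec_find_doc_start_py; infer_instance

-- ===== CLAIM (what is proved, stated in full; the proofs are below) =====
def Claim_equal_find_doc_start_py : Prop := ∀ (content : String) (attr_start : Int) (max_lookback : Int), Dom_find_doc_start_py content attr_start max_lookback → Spec_find_doc_start_py content attr_start max_lookback (find_doc_start_py content attr_start max_lookback)

-- ===== LEMMAS AND PROOFS =====

-- A's prefix sum sum(len(l)+1 for l in lines[:m]) over a Nat prefix length
def pvS (lines : List String) (m : Nat) : Int :=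
  ((lines.take m).map (fun l => PySem.Str.len l + 1)).sum

lemma pvRange_down (j s : Int) :
    PySem.List.pyRange j s (-1) = (List.range (j - s).toNat).map (fun (t : Nat) => j - (t : Int)) := by
  unfold PySem.List.pyRange
  norm_num
  split_ifs with h
  · simp [sub_eq_add_neg]
  · have : (j - s).toNat = 0 := by omega
    simp [this]

lemma pvS_succ (lines : List String) (j : Nat) (hj : j < lines.length) :
    pvS lines (j + 1) = pvS lines j + (PySem.Str.len lines[j] + 1) := by
  unfold pvS
  rw [List.take_add_one]
  simp [hj]

-- B's forward loop, peeling the LAST element of the window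
lemma pvLoopB_append (pos res : Int) (W : List String) (w : String) :
    pvLoopB pos res (W ++ [w]) =
      if pvIsDocB w then pvLoopB pos res W
      else pos + (W.map (fun l => PySem.Str.len l + 1)).sum + (PySem.Str.len w + 1) := by
  induction W generalizing pos res with
  | nil =>
    simp only [List.nil_append, pvLoopB, List.map_nil, List.sum_nil]
    split_ifs <;> simp
  | cons u W ih =>
    simp only [List.cons_append, pvLoopB]
    by_cases hu : pvIsDocB u
    · simp only [hu, if_true, ih]
      split_ifs with hw
      · rfl
      · simp only [List.map_cons, List.sum_cons]; ring
    · simp only [hu, Bool.false_eq_true, if_false, ih]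
      split_ifs with hw
      · rfl
      · simp only [List.map_cons, List.sum_cons]; ring

-- main correspondence: A's descending-index loop over indices (j+1-k)..j equals B's single
-- forward pass over the window lines[(j+1-k)..j] started at offset pvS lines (j+1-k)
lemma pvMain (k : Nat) : ∀ (lines : List String) (j : Nat) (attr : Int), j < lines.length → k ≤ j + 1 →
    pvLoopA lines attr (PySem.List.pyRange (j : Int) ((j : Int) - k) (-1))
      = pvLoopB (pvS lines (j + 1 - k)) attr ((lines.drop (j + 1 - k)).take k) := by
  induction k with
  | zero =>
    intro lines j attr hj hk
    rw [pvRange_down]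
    simp [pvLoopA, pvLoopB]
  | succ k ih =>
    intro lines j attr hj hk
    rw [pvRange_down]
    have hcnt : ((j : Int) - ((j : Int) - ((k : Nat) + 1 : Nat))).toNat = k + 1 := by push_cast; omega
    rw [hcnt, List.range_succ_eq_map]
    have hmap : (List.map (fun (t : Nat) => (j : Int) - (t : Int)) (0 :: List.map Nat.succ (List.range k)))
        = (j : Int) :: List.map (fun (t : Nat) => ((j : Int) - 1) - (t : Int)) (List.range k) := by
      simp only [List.map_cons, List.map_map, Nat.cast_zero, sub_zero]
      congr 1
      apply List.map_congr_left
      intro t _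
      simp only [Function.comp_apply, Nat.succ_eq_add_one]
      push_cast
      ring
    rw [hmap]
    -- the window lines[(j-k)..j] splits as init ++ [lines[j]]
    have hm : j + 1 - (k + 1) = j - k := by omega
    have hlen : k ≤ (lines.drop (j - k)).length := by
      rw [List.length_drop]; omega
    have hidx : (lines.drop (j - k))[k]? = some lines[j] := by
      rw [List.getElem?_drop]
      have : j - k + k = j := by omega
      rw [this, List.getElem?_eq_getElem hj]
    have hwin : (lines.drop (j + 1 - (k + 1))).take (k + 1)
        = (lines.drop (j - k)).take k ++ [lines[j]] := by
      rw [hm, List.take_add_one, hidx]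
      rfl
    rw [hwin, pvLoopB_append]
    -- the accumulated offset before lines[j] is pvS lines j
    have hsum : pvS lines (j + 1 - (k + 1))
          + (((lines.drop (j - k)).take k).map (fun l => PySem.Str.len l + 1)).sum
        = pvS lines j := by
      rw [hm]
      unfold pvS
      have : lines.take j = lines.take (j - k) ++ (lines.drop (j - k)).take k := by
        have hjk : j = (j - k) + k := by omega
        rw [hjk, List.take_add, ← hjk]
      rw [this, List.map_append, List.sum_append]
    -- unfold one step of A's loop
    show pvLoopA lines attr ((j : Int) :: _) = _
    rw [pvLoopA]
    have hget : (PySem.List.pyGet? lines (j : Int)).getD "" = lines[j] := by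
      rw [PySem.List.pyGet?_natCast]
      simp [hj]
    rw [hget]
    by_cases hd : pvIsDocB lines[j]
    · -- doc line: A does not break, B's append-step keeps scanning the init window
      have hcond : ((PySem.Str.strip lines[j] == "")
          || (!(PySem.Str.startswith (PySem.Str.strip lines[j]) "///")
              && !(PySem.Str.startswith (PySem.Str.strip lines[j]) "//!")
              && !(PySem.Str.startswith (PySem.Str.strip lines[j]) "#["))) = false := by
        simp only [pvIsDocB] at hd
        revert hd
        cases (PySem.Str.strip lines[j] == "") <;>
          cases (PySem.Str.startswith (PySem.Str.strip lines[j]) "///") <;>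
          cases (PySem.Str.startswith (PySem.Str.strip lines[j]) "//!") <;>
          cases (PySem.Str.startswith (PySem.Str.strip lines[j]) "#[") <;> simp
      simp only [hcond, Bool.false_eq_true, if_false, hd, if_true]
      match k, hk with
      | 0, _ =>
        simp [pvLoopA, pvLoopB]
      | k + 1, hk =>
        obtain ⟨j', rfl⟩ : ∃ j', j = j' + 1 := ⟨j - 1, by omega⟩
        have hcast : ((j' + 1 : Nat) : Int) - 1 = (j' : Int) := by push_cast; ring
        rw [hcast]
        have := ih lines j' attr (by omega) (by omega)
        rw [pvRange_down, (by push_cast; omega : ((j' : Int) - ((j' : Int) - (((k + 1 : Nat) : Nat) : Int))).toNat = k + 1)] at this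
        rw [this]
        have h1 : j' + 1 - (k + 1) = j' + 1 + 1 - (k + 1 + 1) := by omega
        rw [h1]
    · -- non-doc line: A breaks with the prefix sum; B records exactly that offset last
      have hcond : ((PySem.Str.strip lines[j] == "")
          || (!(PySem.Str.startswith (PySem.Str.strip lines[j]) "///")
              && !(PySem.Str.startswith (PySem.Str.strip lines[j]) "//!")
              && !(PySem.Str.startswith (PySem.Str.strip lines[j]) "#["))) = true := by
        simp only [pvIsDocB] at hd
        revert hd
        cases (PySem.Str.strip lines[j] == "") <;>
          cases (PySem.Str.startswith (PySem.Str.strip lines[j]) "///") <;>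
          cases (PySem.Str.startswith (PySem.Str.strip lines[j]) "//!") <;>
          cases (PySem.Str.startswith (PySem.Str.strip lines[j]) "#[") <;> simp
      simp only [hcond, if_true, hd, Bool.false_eq_true, if_false]
      unfold pvSumPrefA
      rw [PySem.List.slice_to lines (by omega : (0:Int) ≤ (j : Int) + 1)]
      have ht : ((j : Int) + 1).toNat = j + 1 := by omega
      rw [ht]
      show pvS lines (j + 1) = _
      rw [pvS_succ lines j hj, ← hsum]

theorem pvFinal (content : String) (attr mlb : Int) :
    find_doc_start_py content attr mlb = find_doc_start_py_alt content attr mlb := by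
  simp only [find_doc_start_py, find_doc_start_py_alt]
  set text := PySem.Str.slice content none (some attr) with htext
  set L := (PySem.Str.split? text "\n").getD [] with hL
  clear_value L
  clear_value text
  by_cases h0 : L.length = 0
  · -- no lines: both the descending range and the window are empty
    rw [pvRange_down]
    have : (((L.length : Int) - 1) - max (-1) ((L.length : Int) - mlb - 1)).toNat = 0 := by omega
    rw [this]
    rw [PySem.List.slice_from L (by omega : (0:Int) ≤ max 0 ((L.length : Int) - mlb))]
    rcases List.length_eq_zero_iff.mp h0 with rfl
    simp [pvLoopA, pvLoopB]
  · by_cases hm : mlb ≤ 0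
    · -- empty window on both sides
      rw [pvRange_down]
      have : (((L.length : Int) - 1) - max (-1) ((L.length : Int) - mlb - 1)).toNat = 0 := by omega
      rw [this]
      rw [PySem.List.slice_from L (by omega : (0:Int) ≤ max 0 ((L.length : Int) - mlb))]
      have : L.drop (max 0 ((L.length : Int) - mlb)).toNat = [] := by
        apply List.drop_eq_nil_of_le
        omega
      rw [this]
      simp [pvLoopA, pvLoopB]
    · -- nonempty window: apply pvMain with j = len-1, k = min mlb len
      have hn1 : 1 ≤ L.length := by omega
      set k : Nat := (min mlb (L.length : Int)).toNat with hk
      have hj : ((L.length - 1 : Nat) : Int) = (L.length : Int) - 1 := by push_cast [hn1]; ring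
      have harg : ((L.length : Int) - 1) - (k : Int) = max (-1) ((L.length : Int) - mlb - 1) := by
        rw [hk]; omega
      have hmain := pvMain k L (L.length - 1) attr (by omega) (by omega)
      rw [hj, harg] at hmain
      rw [hmain]
      have hlo : L.length - 1 + 1 - k = (max 0 ((L.length : Int) - mlb)).toNat := by omega
      rw [hlo]
      rw [PySem.List.slice_from L (by omega : (0:Int) ≤ max 0 ((L.length : Int) - mlb)),
          PySem.List.slice_to L (by omega : (0:Int) ≤ max 0 ((L.length : Int) - mlb))]
      have hfull : (L.drop (max 0 ((L.length : Int) - mlb)).toNat).take k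
          = L.drop (max 0 ((L.length : Int) - mlb)).toNat := by
        apply List.take_of_length_le
        rw [List.length_drop]
        omega
      rw [hfull]
      rfl

-- ===== VERDICT (by name: the statement is the Claim_ definition above) =====
theorem find_doc_start_py_spec : Claim_equal_find_doc_start_py := by
  intro content attr_start max_lookback _
  unfold Spec_find_doc_start_py
  exact pvFinal content attr_start max_lookback
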